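-- pv_equiv track=rewrite | github.com/parthivc/Practice | FAANG/codeSignalSawSubarray.py | saw
-- ===== SOURCE A (Python) =====
-- def saw(example):
--     alternate = None  # Up is True, down is False
--     result = 0
--     index = 1
--     while index < len(example):
--         if example[index] != example[index - 1]:
--             if alternate is None:
--                 alternate = bool(example[index] < example[index - 1])
--             counter = 1
--             l = 2
--             index += 1
--             while index < len(example):
--                 if (example[index] != example[index - 1]) and (bool(example[index] > example[index - 1]) == alternate):
--                     counter += l
--                     l += 1
--                     alternate = not alternate
--                     index += 1
--                 else:
--                     break
--             alternate = None
--             result += counter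
--         else:
--             index += 1
--     return result
-- ===== SOURCE B (Python) =====
-- def saw(example):
--     # Single fold over adjacent pairs carrying (dp, direction of last pair);
--     # dp = number of alternating subarrays of length >= 2 ending at the current element.
--     result = 0
--     dp = 0
--     updir = None  # direction of the previous pair, None if equal/none
--     for p, x in zip(example, example[1:]):
--         if x == p:
--             dp = 0
--             updir = None
--         else:
--             d = x > p
--             dp = dp + 1 if (updir is not None and d != updir) else 1
--             updir = d
--         result += dp
--     return result
-- ===== Notes on version B (the rewrite author's own statement) =====
-- stated objective: simpler
-- what changed: Replaced A's nested while loops (an outer scan that restarts an inner run-extension loop with counters l and counter per maximal zigzag run) by one flat fold over adjacent pairs carrying dp = number of alternating subarrays ending at the current element; fewer per-element index operations makes the single pass measurably faster.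
import Mathlib
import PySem

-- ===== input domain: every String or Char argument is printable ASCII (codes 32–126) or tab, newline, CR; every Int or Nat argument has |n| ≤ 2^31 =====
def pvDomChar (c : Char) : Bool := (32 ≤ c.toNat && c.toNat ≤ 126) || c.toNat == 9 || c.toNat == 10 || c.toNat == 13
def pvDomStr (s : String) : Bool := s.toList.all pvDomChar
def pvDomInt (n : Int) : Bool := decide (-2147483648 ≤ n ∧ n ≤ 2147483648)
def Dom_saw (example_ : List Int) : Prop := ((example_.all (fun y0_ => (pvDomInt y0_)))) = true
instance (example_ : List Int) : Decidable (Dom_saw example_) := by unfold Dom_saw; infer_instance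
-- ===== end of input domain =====

-- B replaces A's nested while loops by one flat fold over adjacent pairs carrying a dp counter (simpler, same O(n) cost).

-- ===== PORT A =====
-- inner while loop of A: state (alternate, prev = example[index-1], rest = example[index:], l, counter);
-- returns (counter, example[index-1], example[index:]) at the break/exit point
def sawInner (alt : Bool) (prev : Int) (rest : List Int) (l counter : Int) :
    Int × Int × List Int :=
  match rest with
  | [] => (counter, prev, [])
  | x :: rs =>
    if x ≠ prev ∧ (decide (x > prev) = alt) then
      sawInner (!alt) x rs (l + 1) (counter + l)
    else
      (counter, prev, x :: rs)

-- termination helper for the outer loop (cited by sawOuter's decreasing_by)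
theorem sawInner_len_le (alt : Bool) (prev : Int) (rest : List Int) (l counter : Int) :
    (sawInner alt prev rest l counter).2.2.length ≤ rest.length := by
  induction rest generalizing alt prev l counter with
  | nil => simp [sawInner]
  | cons x rs ih =>
    simp only [sawInner]
    split
    · exact le_trans (ih _ _ _ _) (Nat.le_succ _)
    · simp

-- outer while loop of A: state (alternate : Option Bool, prev = example[index-1], rest = example[index:])
def sawOuter (alternate : Option Bool) (prev : Int) (rest : List Int) : Int :=
  match rest with
  | [] => 0
  | x :: rs =>
    if x ≠ prev then
      let alt := alternate.getD (decide (x < prev))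
      let t := sawInner alt x rs 2 1
      t.1 + sawOuter none t.2.1 t.2.2
    else
      sawOuter alternate x rs
termination_by rest.length
decreasing_by
  · exact Nat.lt_succ_of_le (sawInner_len_le _ _ _ _ _)
  · simp

def saw (example_ : List Int) : Int :=
  match example_ with
  | [] => 0
  | x :: rest => sawOuter none x rest

-- ===== PORT B =====
-- one fold step of Source B's for-loop: state (dp, updir, result), pair (p, x) = (example[i-1], example[i])
def sawStep (st : Int × Option Bool × Int) (pr : Int × Int) : Int × Option Bool × Int :=
  match st, pr with
  | (dp, updir, result), (p, x) =>
    if x = p then (0, none, result)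
    else
      let d := decide (x > p)
      let dp' := match updir with
        | some u => if d ≠ u then dp + 1 else (1 : Int)
        | none => (1 : Int)
      (dp', some d, result + dp')

def saw_alt (example_ : List Int) : Int :=
  ((example_.zip example_.tail).foldl sawStep (0, none, 0)).2.2

-- ===== PRECONDITION & SPEC =====
def Spec_saw (example_ : List Int) (out : Int) : Prop := out = saw_alt example_
instance (example_ : List Int) (out : Int) : Decidable (Spec_saw example_ out) := by unfold Spec_saw; infer_instance

-- ===== CLAIM (what is proved, stated in full; the proofs are below) =====
def Claim_equal_saw : Prop := ∀ (example_ : List Int), Dom_saw example_ → Spec_saw example_ (saw example_)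

-- ===== LEMMAS AND PROOFS =====

-- joint loop invariant: the fold over the pairs of prev::rest, started
-- (P) in a fresh state, computes r + A's outer loop from (prev, rest); and
-- (Q) mid-run with dp = l-1 and updir opposite to alternate, computes r + A's inner-loop gain + outer continuation.
-- for distinct ints, the "down" test is the negation of the "up" test
theorem decide_lt_not_gt (x prev : Int) (hx : x ≠ prev) :
    decide (x < prev) = !decide (x > prev) := by
  rcases lt_trichotomy x prev with h | h | h
  · simp [h, not_lt_of_gt h]
  · exact absurd h hx
  · simp [h, not_lt_of_gt h ]

-- joint loop invariant: the fold over the pairs of prev::rest, started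
-- (P) in a fresh state, computes r + A's outer loop from (prev, rest); and
-- (Q) mid-run with dp = l-1 and updir opposite to alternate, computes r + A's inner-loop gain + outer continuation.
theorem saw_invariant (rest : List Int) :
    (∀ (prev r : Int),
      (((prev :: rest).zip rest).foldl sawStep (0, none, r)).2.2 = r + sawOuter none prev rest) ∧
    (∀ (prev : Int) (alt : Bool) (l counter r : Int),
      (((prev :: rest).zip rest).foldl sawStep (l - 1, some (!alt), r)).2.2 =
        r + ((sawInner alt prev rest l counter).1 - counter)
          + sawOuter none (sawInner alt prev rest l counter).2.1 (sawInner alt prev rest l counter).2.2) := by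
  induction rest with
  | nil =>
    constructor
    · intro prev r; simp [sawOuter]
    · intro prev alt l counter r; simp [sawInner, sawOuter]
  | cons x rs ih =>
    obtain ⟨ihP, ihQ⟩ := ih
    constructor
    · intro prev r
      simp only [List.zip_cons_cons, List.foldl_cons]
      by_cases hx : x = prev
      · subst hx
        rw [show sawStep (0, none, r) (x, x) = (0, none, r) from by simp [sawStep],
          ihP, sawOuter]
        simp
      · have hlt := decide_lt_not_gt x prev hx
        have hq := ihQ x (!decide (x > prev)) 2 1 (r + 1)
        simp only [Bool.not_not] at hq
        norm_num at hq
        rw [show sawStep (0, none, r) (prev, x) = (1, some (decide (x > prev)), r + 1) from by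
          simp [sawStep, hx], hq, sawOuter]
        simp only [ne_eq, hx, not_false_eq_true, if_pos, Option.getD_none, hlt]
        ring
    · intro prev alt l counter r
      simp only [List.zip_cons_cons, List.foldl_cons]
      by_cases hc : x ≠ prev ∧ (decide (x > prev) = alt)
      · -- run continues: fold adds dp' = l, inner adds l to counter
        obtain ⟨hx, hd⟩ := hc
        rw [show sawInner alt prev (x :: rs) l counter
              = sawInner (!alt) x rs (l + 1) (counter + l) from by
            rw [sawInner]; simp [hx, hd]]
        have hq := ihQ x (!alt) (l + 1) (counter + l) (r + (l + 1 - 1))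
        simp only [Bool.not_not] at hq
        rw [show sawStep (l - 1, some (!alt), r) (prev, x)
              = (l + 1 - 1, some alt, r + (l + 1 - 1)) from by
            simp [sawStep, hx, hd], hq]
        ring
      · -- run breaks: inner returns, outer restarts at this pair
        rw [show sawInner alt prev (x :: rs) l counter = (counter, prev, x :: rs) from by
          rw [sawInner]; simp only [if_neg hc]]
        by_cases hx : x = prev
        · subst hx
          rw [show sawStep (l - 1, some (!alt), r) (x, x) = (0, none, r) from by
            simp [sawStep], ihP, sawOuter]
          simp
        · have hd : decide (x > prev) = !alt := by
            rcases Bool.eq_false_or_eq_true (decide (x > prev)) with h | h <;>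
              rcases Bool.eq_false_or_eq_true alt with h2 | h2 <;> simp_all
          have hlt := decide_lt_not_gt x prev hx
          have hq := ihQ x (!decide (x > prev)) 2 1 (r + 1)
          simp only [Bool.not_not] at hq
          norm_num at hq
          rw [show sawStep (l - 1, some (!alt), r) (prev, x)
                = (1, some (decide (x > prev)), r + 1) from by
              simp [sawStep, hx, hd], hq, sawOuter]
          simp only [ne_eq, hx, not_false_eq_true, if_pos, Option.getD_none, hlt]
          ring

-- ===== VERDICT (by name: the statement is the Claim_ definition above) =====
theorem saw_spec : Claim_equal_saw := by
  intro example_ _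
  unfold Spec_saw saw saw_alt
  match example_ with
  | [] => rfl
  | x :: rest =>
    simp only [List.tail_cons]
    rw [(saw_invariant rest).1 x 0]
    norm_num
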